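-- pv_equiv track=rewrite | github.com/maniraja1/Python | proj1/Python-Test1/windows_morsels.py | window5
-- ===== SOURCE A (Python) =====
-- from collections import  deque
--
-- def window5(iterable, n, fill=None):
--     """Yield tuples including iterable item and the next n-1 items."""
--     if n == 0:
--         return
--     current = deque(maxlen=n)
--     for item in iterable:
--         current.append(item)
--         if len(current) == n:
--             yield tuple(current)
--     if len(current) < n:
--         yield tuple(current) + (fill,) * (n - len(current))
-- ===== SOURCE B (Python) =====
-- def window5(iterable, n, fill=None):
--     """Yield tuples including iterable item and the next n-1 items."""
--     if n == 0:
--         return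
--     if n < 0:
--         raise ValueError("n must be non-negative")
--     data = list(iterable)
--     L = len(data)
--     if L < n:
--         yield tuple(data) + (fill,) * (n - L)
--         return
--     for i in range(L - n + 1):
--         yield tuple(data[i:i + n])
-- ===== Notes on version B (the rewrite author's own statement) =====
-- stated objective: idiomatic
-- what changed: Replaced the rolling deque that is appended to item by item with a materialized list and a loop over window start indices yielding slices; the short-input padded tuple is produced by one direct case instead of leftover loop state. Pre_ excludes n < 0, where A raises ValueError from deque(maxlen=n) (B raises ValueError too).
import Mathlib
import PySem

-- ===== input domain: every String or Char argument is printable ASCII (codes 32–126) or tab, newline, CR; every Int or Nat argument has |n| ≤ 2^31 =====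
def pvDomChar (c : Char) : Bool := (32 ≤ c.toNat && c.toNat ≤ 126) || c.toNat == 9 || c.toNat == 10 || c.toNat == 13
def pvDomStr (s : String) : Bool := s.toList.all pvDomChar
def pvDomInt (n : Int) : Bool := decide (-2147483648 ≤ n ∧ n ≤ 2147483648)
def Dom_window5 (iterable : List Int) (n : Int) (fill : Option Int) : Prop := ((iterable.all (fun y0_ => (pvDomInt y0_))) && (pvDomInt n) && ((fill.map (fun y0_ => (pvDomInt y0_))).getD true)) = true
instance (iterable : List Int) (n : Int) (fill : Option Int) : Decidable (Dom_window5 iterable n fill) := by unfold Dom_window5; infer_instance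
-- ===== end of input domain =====

-- B replaces A's rolling deque with an index loop over slices of the materialized list; same values, no speed claim.


-- ===== PORT A =====
-- one loop step: deque append with maxlen k (drop from the left when over capacity), yield when full
def window5Step (k : Nat) (st : List (Option Int) × List (List (Option Int))) (item : Int) :
    List (Option Int) × List (List (Option Int)) :=
  let cur0 := st.1 ++ [some item]
  let cur := if k < cur0.length then cur0.tail else cur0
  if cur.length = k then (cur, st.2 ++ [cur]) else (cur, st.2)

def window5 (iterable : List Int) (n : Int) (fill : Option Int) : List (List (Option Int)) :=
  if n = 0 then []
  else
    let st := iterable.foldl (window5Step n.toNat) ([], [])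
    if (st.1.length : Int) < n then st.2 ++ [st.1 ++ List.replicate (n.toNat - st.1.length) fill]
    else st.2

-- ===== PORT B =====
-- data[i:i+n] with 0 ≤ i and 0 ≤ n is exactly (drop i).take n
def window5_alt (iterable : List Int) (n : Int) (fill : Option Int) : List (List (Option Int)) :=
  if n = 0 then []
  else
    let L := iterable.length
    if (L : Int) < n then [iterable.map some ++ List.replicate (n.toNat - L) fill]
    else (List.range (L - n.toNat + 1)).map (fun i => ((iterable.drop i).take n.toNat).map some)

-- ===== PRECONDITION & SPEC =====
-- Pre_ excludes n < 0: there Python A raises ValueError from deque(maxlen=n).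
def Pre_window5 (iterable : List Int) (n : Int) (fill : Option Int) : Prop := 0 ≤ n
instance (iterable : List Int) (n : Int) (fill : Option Int) : Decidable (Pre_window5 iterable n fill) := by unfold Pre_window5; infer_instance
def pvWitness_window5 : List Int × Int × Option Int := ([1, 2, 3], 2, some 0)

def Spec_window5 (iterable : List Int) (n : Int) (fill : Option Int) (out : List (List (Option Int))) : Prop := out = window5_alt iterable n fill
instance (iterable : List Int) (n : Int) (fill : Option Int) (out : List (List (Option Int))) : Decidable (Spec_window5 iterable n fill out) := by unfold Spec_window5; infer_instance

-- ===== CLAIM (what is proved, stated in full; the proofs are below) =====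
def Claim_equal_window5 : Prop := ∀ (iterable : List Int) (n : Int) (fill : Option Int), Dom_window5 iterable n fill → Pre_window5 iterable n fill → Spec_window5 iterable n fill (window5 iterable n fill)

-- ===== LEMMAS AND PROOFS =====

-- closed form of the deque simulation after consuming xs, for window size k ≥ 1
theorem window5_sim (k : Nat) (hk : 0 < k) (xs : List Int) :
    xs.foldl (window5Step k) ([], []) =
      ((xs.map some).drop (xs.length - k),
       (List.range (xs.length + 1 - k)).map (fun i => ((xs.drop i).take k).map some)) := by
  induction xs using List.reverseRecOn with
  | nil => simp; omega
  | append_singleton xs a ih =>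
    rw [List.foldl_append, ih]
    simp only [List.foldl_cons, List.foldl_nil, window5Step]
    by_cases hL : xs.length < k
    · have hd : xs.length - k = 0 := by omega
      have hlen : ((xs.map some).drop (xs.length - k) ++ [some a]).length = xs.length + 1 := by simp [hd]
      have hnot : ¬ k < xs.length + 1 := by omega
      by_cases he : xs.length + 1 = k
      · have h2 : (xs ++ [a]).length + 1 - k = 1 := by simp; omega
        have h3 : xs.length + 1 - k = 0 := by omega
        have h1 : (xs ++ [a]).length - k = 0 := by simp; omega
        simp [hd, h1, h2, h3, hlen, hnot, he, List.range_succ, List.take_of_length_le]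
      · have h2 : (xs ++ [a]).length + 1 - k = 0 := by simp; omega
        have h3 : xs.length + 1 - k = 0 := by omega
        have h1 : (xs ++ [a]).length - k = 0 := by simp; omega
        simp [hd, h2, h3, hlen, hnot, he]
        omega
    · -- k ≤ xs.length : the deque is full; it rolls and yields
      have hkL : k ≤ xs.length := by omega
      have hlen : ((xs.map some).drop (xs.length - k) ++ [some a]).length = k + 1 := by
        simp; omega
      have hlt : k < ((xs.map some).drop (xs.length - k) ++ [some a]).length := by omega
      have hxne : (xs.map some).drop (xs.length - k) ≠ [] := by
        intro h
        have := congrArg List.length h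
        simp at this; omega
      have htail : ((xs.map some).drop (xs.length - k) ++ [some a]).tail
          = (xs.map some).drop (xs.length - k + 1) ++ [some a] := by
        rw [List.tail_append_of_ne_nil hxne, ← List.drop_drop, List.drop_one]
      have hcur : (xs.map some).drop (xs.length - k + 1) ++ [some a]
          = ((xs ++ [a]).map some).drop ((xs ++ [a]).length - k) := by
        have h1 : (xs ++ [a]).length - k = xs.length + 1 - k := by simp
        have h2 : xs.length + 1 - k ≤ (xs.map some).length := by simp; omega
        rw [h1, List.map_append, List.drop_append_of_le_length h2]
        simp
        omega
      have hclen : (((xs.map some).drop (xs.length - k + 1) ++ [some a])).length = k := by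
        simp; omega
      have hr : (xs ++ [a]).length + 1 - k = (xs.length + 1 - k) + 1 := by simp; omega
      simp only [hlt, if_true, htail, hcur]
      have hclen' : (((xs ++ [a]).map some).drop ((xs ++ [a]).length - k)).length = k := by
        simp; omega
      rw [if_pos hclen']
      refine Prod.ext rfl ?_
      simp only [hr, List.range_succ, List.map_append, List.map_cons, List.map_nil]
      congr 1
      · apply List.map_congr_left
        intro i hi
        simp only [List.mem_range] at hi
        have hiL : i ≤ xs.length := by omega
        have hik : k ≤ (xs.drop i).length := by simp; omega
        rw [List.drop_append_of_le_length hiL, List.take_append_of_le_length hik]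
      · -- the new window
        have h1 : (xs ++ [a]).length - k = xs.length + 1 - k := by simp
        have hiL : xs.length + 1 - k ≤ xs.length := by omega
        have hiL' : xs.length + 1 - k ≤ (xs.map some).length := by simp; omega
        have htot : (xs.drop (xs.length + 1 - k) ++ [a]).length ≤ k := by
          simp [List.length_drop]; omega
        rw [h1, List.drop_append_of_le_length hiL', List.drop_append_of_le_length hiL,
          List.take_of_length_le htot]
        simp [List.map_drop]

-- ===== VERDICT (by name: the statement is the Claim_ definition above) =====
theorem window5_spec : Claim_equal_window5 := by
  intro iterable n fill _ hpre
  replace hpre : 0 ≤ n := hpre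
  unfold Spec_window5 window5 window5_alt
  by_cases h0 : n = 0
  · simp [h0]
  · simp only [h0, if_false]
    have hk : 0 < n.toNat := by omega
    rw [window5_sim n.toNat hk iterable]
    by_cases hl : (iterable.length : Int) < n
    · have h1 : iterable.length - n.toNat = 0 := by omega
      have h2 : iterable.length + 1 - n.toNat = 0 := by omega
      simp [h1, h2, hl]
    · have h1 : iterable.length - n.toNat + n.toNat = iterable.length := by omega
      have hlen : ((iterable.map some).drop (iterable.length - n.toNat)).length = n.toNat := by
        simp; omega
      have h2 : iterable.length + 1 - n.toNat = iterable.length - n.toNat + 1 := by omega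
      have hne : ¬ ((((iterable.map some).drop (iterable.length - n.toNat)).length : Int) < n) := by
        rw [hlen]; omega
      simp only [hne, if_false, hl, if_false, h2]
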